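-- pv_equiv track=rewrite | github.com/dmitriydiden/Python-Homework5 | task1.py | convert
-- ===== SOURCE A (Python) =====
-- def convert(s1):
--     ss1=[]
--     s = ''
--     for i in s1:
--         if i in ['+', '-']:
--             ss1.append(s)
--             s=''
--             ss1.append(i)
--         else:
--             s+=i
--     ss1.append(s)
--     return ss1
-- ===== SOURCE B (Python) =====
-- def convert(s1):
--     # Recursive decomposition: find the first '+'/'-', slice around it, recurse on the rest.
--     for i, c in enumerate(s1):
--         if c in '+-':
--             return [s1[:i], c] + convert(s1[i + 1:])
--     return [s1]
-- ===== Notes on version B (the rewrite author's own statement) =====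
-- stated objective: alternative
-- what changed: Replaces A's single pass that grows a character buffer and flushes it at each delimiter by a recursive decomposition: find the first '+'/'-' via enumerate, emit the slice before it and the delimiter, and recurse on the slice after it.
import Mathlib
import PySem

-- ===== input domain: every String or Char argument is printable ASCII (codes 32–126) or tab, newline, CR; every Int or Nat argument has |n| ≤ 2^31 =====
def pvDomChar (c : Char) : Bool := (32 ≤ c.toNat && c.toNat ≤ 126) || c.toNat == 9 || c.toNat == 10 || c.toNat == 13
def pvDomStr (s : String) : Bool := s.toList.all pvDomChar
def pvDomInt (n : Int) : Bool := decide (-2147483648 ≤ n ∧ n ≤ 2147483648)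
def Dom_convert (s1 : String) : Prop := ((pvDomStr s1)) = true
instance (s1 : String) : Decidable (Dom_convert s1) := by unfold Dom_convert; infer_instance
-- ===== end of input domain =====

-- B replaces A's single pass with a char buffer by a recursive decomposition:
-- find the first '+'/'-', slice before/at it, recurse on the rest (objective: alternative; same cost).


-- ===== PORT A =====
-- A's loop body: on '+'/'-' flush the buffer and the delimiter, else grow the buffer.
def convStepA (p : List String × String) (c : Char) : List String × String :=
  if c = '+' ∨ c = '-' then (p.1 ++ [p.2, String.ofList [c]], "") else (p.1, p.2.push c)

def convert (s1 : String) : List String :=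
  let r := s1.toList.foldl convStepA ([], "")
  r.1 ++ [r.2]

-- ===== PORT B =====
-- Source B's enumerate loop that returns the first delimiter's index and character.
def altFind : List Char → Option (Nat × Char)
  | [] => none
  | c :: cs => if c = '+' ∨ c = '-' then some (0, c) else (altFind cs).map (fun p => (p.1 + 1, p.2))

-- termination fact for altGo, cited in decreasing_by
theorem altFind_lt (cs : List Char) (i : Nat) (c : Char) (h : altFind cs = some (i, c)) :
    i < cs.length := by
  induction cs generalizing i with
  | nil => simp [altFind] at h
  | cons x xs ih =>
    simp only [altFind] at h
    split at h
    · rw [Option.some.injEq, Prod.mk.injEq] at h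
      obtain ⟨h1, h2⟩ := h
      simp [← h1]
    · obtain ⟨⟨j, d⟩, hj, he⟩ := Option.map_eq_some_iff.mp h
      simp only [Prod.mk.injEq] at he
      obtain ⟨hji, rfl⟩ := he
      have := ih j hj
      simp only [List.length_cons]
      omega

-- slicing at the first delimiter: s1[:i] = take i, s1[i+1:] = drop (i+1) (both bounds in range)
def altGo (cs : List Char) : List String :=
  match h : altFind cs with
  | none => [String.ofList cs]
  | some (i, c) => [String.ofList (cs.take i), String.ofList [c]] ++ altGo (cs.drop (i + 1))
termination_by cs.length
decreasing_by
  have := altFind_lt cs i c h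
  simp only [List.length_drop]; omega

def convert_alt (s1 : String) : List String := altGo s1.toList

-- ===== PRECONDITION & SPEC =====
def Spec_convert (s1 : String) (out : List String) : Prop := out = convert_alt s1
instance (s1 : String) (out : List String) : Decidable (Spec_convert s1 out) := by unfold Spec_convert; infer_instance

-- ===== CLAIM (what is proved, stated in full; the proofs are below) =====
def Claim_equal_convert : Prop := ∀ (s1 : String), Dom_convert s1 → Spec_convert s1 (convert s1)

-- ===== LEMMAS AND PROOFS =====

-- reference shape of the result, on char lists
def specL : List Char → List (List Char)
  | [] => [[]]
  | c :: cs =>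
    if c = '+' ∨ c = '-' then [] :: [c] :: specL cs
    else
      match specL cs with
      | [] => [[c]]
      | t :: ts => (c :: t) :: ts

theorem specL_ne_nil (cs : List Char) : specL cs ≠ [] := by
  cases cs with
  | nil => simp [specL]
  | cons c cs =>
    simp only [specL]
    split
    · simp
    · split <;> simp

def hdExt (s : List Char) : List (List Char) → List (List Char)
  | [] => [s]
  | t :: ts => (s ++ t) :: ts

theorem ofList_push (l : List Char) (c : Char) :
    (String.ofList l).push c = String.ofList (l ++ [c]) := by
  apply String.toList_inj.mp; simp

theorem empty_eq_ofList_nil : ("" : String) = String.ofList [] := by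
  apply String.toList_inj.mp; simp

theorem A_fold (cs : List Char) : ∀ (ss : List String) (s : List Char),
    (let r := cs.foldl convStepA (ss, String.ofList s); r.1 ++ [r.2]) =
      ss ++ (hdExt s (specL cs)).map String.ofList := by
  induction cs with
  | nil => intro ss s; simp [specL, hdExt]
  | cons c cs ih =>
    intro ss s
    simp only [List.foldl_cons]
    by_cases hc : c = '+' ∨ c = '-'
    · have hstep : convStepA (ss, String.ofList s) c
          = (ss ++ [String.ofList s, String.ofList [c]], String.ofList []) := by
        rw [convStepA, if_pos hc, ← empty_eq_ofList_nil]
      rw [hstep, ih]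
      rcases h : specL cs with _ | ⟨t, ts⟩
      · exact absurd h (specL_ne_nil cs)
      · simp [specL, hc, h, hdExt]
    · have hstep : convStepA (ss, String.ofList s) c = (ss, String.ofList (s ++ [c])) := by
        simp [convStepA, hc, ofList_push]
      rw [hstep, ih]
      rcases h : specL cs with _ | ⟨t, ts⟩
      · exact absurd h (specL_ne_nil cs)
      · simp [specL, hc, h, hdExt]

theorem convert_eq_spec (s1 : String) :
    convert s1 = (specL s1.toList).map String.ofList := by
  show (let r := s1.toList.foldl convStepA ([], ""); r.1 ++ [r.2]) = _
  rw [empty_eq_ofList_nil, A_fold s1.toList [] []]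
  rcases h : specL s1.toList with _ | ⟨t, ts⟩
  · exact absurd h (specL_ne_nil _)
  · simp [hdExt]

theorem altFind_none_nodelim (cs : List Char) (h : altFind cs = none) :
    ∀ x ∈ cs, ¬(x = '+' ∨ x = '-') := by
  induction cs with
  | nil => simp
  | cons c cs ih =>
    simp only [altFind] at h
    split at h
    · simp at h
    · intro x hx
      rcases List.mem_cons.mp hx with rfl | hx
      · assumption
      · exact ih (by simpa using h) x hx

theorem specL_nodelim (cs : List Char) (h : ∀ x ∈ cs, ¬(x = '+' ∨ x = '-')) :
    specL cs = [cs] := by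
  induction cs with
  | nil => rfl
  | cons c cs ih =>
    have hc : ¬(c = '+' ∨ c = '-') := h c (by simp)
    have := ih (fun x hx => h x (by simp [hx]))
    simp [specL, hc, this]

theorem altFind_some_split (cs : List Char) (i : Nat) (c : Char)
    (h : altFind cs = some (i, c)) :
    ∃ pre post, cs = pre ++ c :: post ∧ pre.length = i ∧
      (∀ x ∈ pre, ¬(x = '+' ∨ x = '-')) ∧ (c = '+' ∨ c = '-') := by
  induction cs generalizing i with
  | nil => simp [altFind] at h
  | cons x xs ih =>
    simp only [altFind] at h
    split at h
    · rename_i hx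
      rw [Option.some.injEq, Prod.mk.injEq] at h
      obtain ⟨h1, h2⟩ := h
      subst h2
      exact ⟨[], xs, rfl, by simp [← h1], by simp, hx⟩
    · rename_i hx
      obtain ⟨⟨j, d⟩, hj, he⟩ := Option.map_eq_some_iff.mp h
      simp only [Prod.mk.injEq] at he
      obtain ⟨hji, rfl⟩ := he
      obtain ⟨pre, post, hcs, hlen, hpre, hd⟩ := ih j hj
      refine ⟨x :: pre, post, by simp [hcs], by simp [hlen, hji], ?_, hd⟩
      intro y hy
      rcases List.mem_cons.mp hy with rfl | hy
      · exact hx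
      · exact hpre y hy

theorem specL_split (pre post : List Char) (c : Char)
    (hpre : ∀ x ∈ pre, ¬(x = '+' ∨ x = '-')) (hc : c = '+' ∨ c = '-') :
    specL (pre ++ c :: post) = pre :: [c] :: specL post := by
  induction pre with
  | nil => simp [specL, hc]
  | cons x xs ih =>
    have hx : ¬(x = '+' ∨ x = '-') := hpre x (by simp)
    have := ih (fun y hy => hpre y (by simp [hy]))
    simp [specL, hx, this]

theorem altGo_eq_spec (cs : List Char) : altGo cs = (specL cs).map String.ofList := by
  induction cs using altGo.induct with
  | case1 cs h =>
    rw [altGo, h, specL_nodelim cs (altFind_none_nodelim cs h)]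
    simp
  | case2 cs i c h ih =>
    obtain ⟨pre, post, hcs, hlen, hpre, hc⟩ := altFind_some_split cs i c h
    rw [altGo]
    split
    · rename_i heq
      rw [heq] at h
      simp at h
    · rename_i i' c' heq
      rw [heq] at h
      rw [Option.some.injEq, Prod.mk.injEq] at h
      obtain ⟨rfl, rfl⟩ := h
      subst hcs
      have htake : (pre ++ c' :: post).take i' = pre := by
        rw [← hlen]
        exact List.take_left
      have hdrop : (pre ++ c' :: post).drop (i' + 1) = post := by
        rw [show pre ++ c' :: post = (pre ++ [c']) ++ post by simp, ← hlen,
          show pre.length + 1 = (pre ++ [c']).length by simp]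
        exact List.drop_left
      rw [htake, hdrop]
      rw [hdrop] at ih
      rw [ih, specL_split pre post c' hpre hc]
      simp

-- ===== VERDICT (by name: the statement is the Claim_ definition above) =====
theorem convert_spec : Claim_equal_convert := by
  intro s1 _
  show convert s1 = convert_alt s1
  rw [convert_eq_spec, convert_alt, altGo_eq_spec]
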